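-- pv_equiv track=rewrite | github.com/yosiash97/AWProject | scraping.py | strip_commas_spaces
-- ===== SOURCE A (Python) =====
-- def strip_commas_spaces(string):
--     if not string:
--         return ""
--     new_str = ""
--     for i in range(len(string)):
--         if (string[i] == ' ' or string[i] == ',') and i == len(string) - 2:
--             return new_str
--         else:
--             new_str += string[i]
--
--     return new_str
-- ===== SOURCE B (Python) =====
-- def strip_commas_spaces(string):
--     if not string:
--         return ""
--     if len(string) >= 2 and string[-2] in (' ', ','):
--         return string[:-2]
--     return string
-- ===== Notes on version B (the rewrite author's own statement) =====
-- stated objective: simpler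
-- what changed: Replaces A's character-copying loop with early return by a closed form that inspects only string[-2] and returns either string[:-2] or the string unchanged.
import Mathlib
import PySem

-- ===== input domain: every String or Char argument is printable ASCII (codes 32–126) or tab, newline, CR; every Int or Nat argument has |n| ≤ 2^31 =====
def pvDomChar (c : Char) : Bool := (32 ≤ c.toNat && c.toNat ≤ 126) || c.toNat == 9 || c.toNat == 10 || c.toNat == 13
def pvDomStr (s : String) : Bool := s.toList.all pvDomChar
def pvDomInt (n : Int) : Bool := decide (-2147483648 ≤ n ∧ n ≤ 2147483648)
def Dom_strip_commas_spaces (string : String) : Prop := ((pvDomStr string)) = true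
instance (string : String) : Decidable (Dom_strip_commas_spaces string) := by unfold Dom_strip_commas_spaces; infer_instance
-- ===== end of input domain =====

-- B replaces A's character-copying loop (with early return at index len-2) by a
-- closed form that inspects only the character at position len-2: simpler, no loop.

-- ===== PORT A =====
-- the for-loop over range(len(string)): i is the current index, n = len(string),
-- acc is new_str; the early 'return new_str' becomes returning acc.
-- i == len(string) - 2 is an Int comparison (Python's len-2 can be -1 or -2).
def pvALoop (cs : List Char) (n : Int) (i : Int) (acc : List Char) : List Char :=
  match cs with
  | [] => acc
  | c :: rest =>
      if (c = ' ' ∨ c = ',') ∧ i = n - 2 then acc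
      else pvALoop rest n (i + 1) (acc ++ [c])

def strip_commas_spaces (string : String) : String :=
  if string.toList = [] then ""
  else String.ofList (pvALoop string.toList (string.toList.length : Int) 0 [])

-- ===== PORT B =====
-- string[-2] is cs.getD (len-2) (exact: guarded by 2 ≤ len); string[:-2] is take (len-2).
def strip_commas_spaces_alt (string : String) : String :=
  let cs := string.toList
  if cs = [] then ""
  else if 2 ≤ cs.length ∧ (cs.getD (cs.length - 2) 'x' = ' ' ∨ cs.getD (cs.length - 2) 'x' = ',')
    then String.ofList (cs.take (cs.length - 2))
    else string

-- ===== PRECONDITION & SPEC =====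
def Spec_strip_commas_spaces (string : String) (out : String) : Prop := out = strip_commas_spaces_alt string
instance (string : String) (out : String) : Decidable (Spec_strip_commas_spaces string out) := by unfold Spec_strip_commas_spaces; infer_instance

-- ===== CLAIM (what is proved, stated in full; the proofs are below) =====
def Claim_equal_strip_commas_spaces : Prop := ∀ (string : String), Dom_strip_commas_spaces string → Spec_strip_commas_spaces string (strip_commas_spaces string)

-- ===== LEMMAS AND PROOFS =====

theorem pvALoop_nil (n i : Int) (acc : List Char) : pvALoop [] n i acc = acc := rfl

theorem pvALoop_cons (c : Char) (rest : List Char) (n i : Int) (acc : List Char) :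
    pvALoop (c :: rest) n i acc =
      if (c = ' ' ∨ c = ',') ∧ i = n - 2 then acc
      else pvALoop rest n (i + 1) (acc ++ [c]) := rfl

-- pure characterisation of A's loop: early return fires exactly when the
-- remaining suffix has length 2 and its head is a space or comma.
def pvStripTail : List Char → List Char
  | [] => []
  | [c] => [c]
  | [c, d] => if c = ' ' ∨ c = ',' then [] else [c, d]
  | c :: d :: e :: rest => c :: pvStripTail (d :: e :: rest)

theorem pvStripTail_nil : pvStripTail [] = [] := rfl
theorem pvStripTail_one (c : Char) : pvStripTail [c] = [c] := rfl
theorem pvStripTail_two (c d : Char) :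
    pvStripTail [c, d] = if c = ' ' ∨ c = ',' then [] else [c, d] := rfl
theorem pvStripTail_cons3 (c d e : Char) (rest : List Char) :
    pvStripTail (c :: d :: e :: rest) = c :: pvStripTail (d :: e :: rest) := rfl

theorem pvALoop_eq (cs : List Char) : ∀ (n i : Int) (acc : List Char),
    i + cs.length = n → pvALoop cs n i acc = acc ++ pvStripTail cs := by
  induction cs with
  | nil => intro n i acc _; simp [pvALoop_nil, pvStripTail_nil]
  | cons c rest ih =>
    intro n i acc h
    match rest with
    | [] =>
      have hi : ¬(i = n - 2) := by simp at h; omega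
      rw [pvALoop_cons, if_neg (by tauto), pvALoop_nil, pvStripTail_one]
    | [d] =>
      have hi : i = n - 2 := by simp at h; omega
      by_cases hc : c = ' ' ∨ c = ','
      · rw [pvALoop_cons, if_pos ⟨hc, hi⟩, pvStripTail_two, if_pos hc]
        simp
      · have hi2 : ¬((i + 1 : Int) = n - 2) := by simp at h; omega
        rw [pvALoop_cons, if_neg (by tauto), pvALoop_cons, if_neg (by tauto),
            pvALoop_nil, pvStripTail_two, if_neg hc]
        simp
    | d :: e :: rest' =>
      have hi : ¬(i = n - 2) := by simp at h; omega
      rw [pvALoop_cons, if_neg (by tauto),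
          ih n (i + 1) (acc ++ [c]) (by simp at h ⊢; omega),
          pvStripTail_cons3]
      simp

theorem pvStripTail_eq (cs : List Char) :
    pvStripTail cs =
      if 2 ≤ cs.length ∧ (cs.getD (cs.length - 2) 'x' = ' ' ∨ cs.getD (cs.length - 2) 'x' = ',')
      then cs.take (cs.length - 2) else cs := by
  induction cs with
  | nil => simp [pvStripTail_nil]
  | cons c rest ih =>
    match rest with
    | [] => simp [pvStripTail_one]
    | [d] =>
      by_cases hc : c = ' ' ∨ c = ','
      · rcases hc with h | h <;> subst h <;> simp [pvStripTail_two]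
      · have h1 : c ≠ ' ' := fun h => hc (Or.inl h)
        have h2 : c ≠ ',' := fun h => hc (Or.inr h)
        simp [pvStripTail_two, h1, h2]
    | d :: e :: rest' =>
      rw [pvStripTail_cons3, ih]
      simp only [List.length_cons]
      have e1 : rest'.length + 1 + 1 - 2 = rest'.length := by omega
      have e2 : rest'.length + 1 + 1 + 1 - 2 = rest'.length + 1 := by omega
      rw [e1, e2]
      simp only [List.getD_cons_succ, List.take_succ_cons]
      split_ifs with h1 h2 h3
      · rfl
      · exact absurd ⟨by omega, h1.2⟩ h2
      · exact absurd ⟨by omega, h3.2⟩ h1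
      · rfl

-- ===== VERDICT (by name: the statement is the Claim_ definition above) =====
theorem strip_commas_spaces_spec : Claim_equal_strip_commas_spaces := by
  intro s _
  unfold Spec_strip_commas_spaces strip_commas_spaces strip_commas_spaces_alt
  by_cases h : s.toList = []
  · simp [h]
  · rw [if_neg h, if_neg h,
        pvALoop_eq s.toList (s.toList.length : Int) 0 [] (by simp), List.nil_append,
        pvStripTail_eq]
    split
    · rfl
    · exact String.ofList_toList
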